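-- pv_equiv track=rewrite | github.com/F-game25/AI-EMPLOYEE | runtime/agents/lead-intelligence/deal_matching_agent.py | _find_lead
-- ===== SOURCE A (Python) =====
-- def _find_lead(query: str, crm: list) -> dict | None:
--     """Find a lead by ID or name (case-insensitive prefix)."""
--     for l in crm:
--         if l.get("id") == query:
--             return l
--     q = query.lower()
--     for l in crm:
--         if l.get("name", "").lower().startswith(q):
--             return l
--     return None
-- ===== SOURCE B (Python) =====
-- def _find_lead(query: str, crm: list) -> dict | None:
--     """Find a lead by ID or name (case-insensitive prefix), in one pass."""
--     q = query.lower()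
--     name_hit = None
--     for l in crm:
--         if l.get("id") == query:
--             return l
--         if name_hit is None and l.get("name", "").lower().startswith(q):
--             name_hit = l
--     return name_hit
-- ===== Notes on version B (the rewrite author's own statement) =====
-- stated objective: simpler
-- what changed: Replaced A's two sequential scans (one for id, one for name-prefix) with a single pass that returns immediately on an id match and holds the first name-prefix match in a variable returned after the loop.
import Mathlib
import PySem

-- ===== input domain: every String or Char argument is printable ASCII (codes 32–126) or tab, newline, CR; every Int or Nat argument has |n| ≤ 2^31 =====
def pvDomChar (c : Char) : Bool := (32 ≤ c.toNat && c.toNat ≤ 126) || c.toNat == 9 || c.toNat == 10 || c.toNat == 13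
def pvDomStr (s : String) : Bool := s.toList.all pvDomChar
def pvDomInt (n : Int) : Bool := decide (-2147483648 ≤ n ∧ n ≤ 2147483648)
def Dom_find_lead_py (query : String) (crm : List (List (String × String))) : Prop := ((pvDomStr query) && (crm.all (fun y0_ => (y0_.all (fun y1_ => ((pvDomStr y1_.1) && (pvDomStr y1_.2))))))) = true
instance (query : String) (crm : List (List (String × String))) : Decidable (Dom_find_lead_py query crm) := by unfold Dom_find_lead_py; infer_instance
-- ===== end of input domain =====

-- B replaces A's two sequential scans with a single pass holding the first name-prefix match (objective: simpler).

-- ===== PORT A =====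
-- first loop of A: return the first lead whose "id" equals query
def pvA_idLoop (query : String) : List (List (String × String)) → Option (List (String × String))
  | [] => none
  | l :: rest =>
    if (PySem.Dict.mk l).get? "id" = some query then some l else pvA_idLoop query rest

-- second loop of A: return the first lead whose lowered "name" starts with q
def pvA_nameLoop (q : String) : List (List (String × String)) → Option (List (String × String))
  | [] => none
  | l :: rest =>
    if PySem.Str.startswith (PySem.Str.lower ((PySem.Dict.mk l).getD "name" "")) q then some l
    else pvA_nameLoop q rest

def find_lead_py (query : String) (crm : List (List (String × String))) : Option (List (String × String)) :=
  match pvA_idLoop query crm with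
  | some l => some l
  | none => pvA_nameLoop (PySem.Str.lower query) crm

-- ===== PORT B =====
-- single pass: return immediately on an id match, keep the first name-prefix hit in `hit`
def pvB_loop (query q : String) : List (List (String × String)) → Option (List (String × String)) → Option (List (String × String))
  | [], hit => hit
  | l :: rest, hit =>
    if (PySem.Dict.mk l).get? "id" = some query then some l
    else pvB_loop query q rest
      (if hit.isNone && PySem.Str.startswith (PySem.Str.lower ((PySem.Dict.mk l).getD "name" "")) q
       then some l else hit)

def find_lead_py_alt (query : String) (crm : List (List (String × String))) : Option (List (String × String)) :=
  pvB_loop query (PySem.Str.lower query) crm none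

-- ===== PRECONDITION & SPEC =====
def Spec_find_lead_py (query : String) (crm : List (List (String × String))) (out : Option (List (String × String))) : Prop := out = find_lead_py_alt query crm
instance (query : String) (crm : List (List (String × String))) (out : Option (List (String × String))) : Decidable (Spec_find_lead_py query crm out) := by unfold Spec_find_lead_py; infer_instance

-- ===== CLAIM (what is proved, stated in full; the proofs are below) =====
def Claim_equal_find_lead_py : Prop := ∀ (query : String) (crm : List (List (String × String))), Dom_find_lead_py query crm → Spec_find_lead_py query crm (find_lead_py query crm)

-- ===== LEMMAS AND PROOFS =====
-- loop invariant: the one-pass loop equals "id scan first, then held hit, then name scan"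
theorem pvB_loop_inv (query q : String) (crm : List (List (String × String))) :
    ∀ hit, pvB_loop query q crm hit =
      match pvA_idLoop query crm with
      | some l => some l
      | none => match hit with
        | some h => some h
        | none => pvA_nameLoop q crm := by
  induction crm with
  | nil => intro hit; cases hit <;> simp [pvB_loop, pvA_idLoop, pvA_nameLoop]
  | cons l rest ih =>
    intro hit
    by_cases hid : (PySem.Dict.mk l).get? "id" = some query
    · simp [pvB_loop, pvA_idLoop, hid]
    · cases hit with
      | some h =>
        simp [pvB_loop, pvA_idLoop, hid, ih]
      | none =>
        by_cases hn : PySem.Chars.startswith (PySem.Chars.lower ((PySem.Dict.mk l).getD "name" "").toList) q.toList = true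
        · simp [pvB_loop, pvA_idLoop, pvA_nameLoop, hid, hn, ih]
        · simp [pvB_loop, pvA_idLoop, pvA_nameLoop, hid, hn, ih]

-- ===== VERDICT (by name: the statement is the Claim_ definition above) =====
theorem find_lead_py_spec : Claim_equal_find_lead_py := by
  intro query crm _
  unfold Spec_find_lead_py find_lead_py find_lead_py_alt
  rw [pvB_loop_inv]
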